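-- pv_equiv track=rewrite | github.com/ochu761/2022_S1_CS373_AssignmentSkeleton | CS373LicensePlateDetection.py | computeDilation8Nbh3x3FlatSE
-- ===== SOURCE A (Python) =====
-- def createInitializedGreyscalePixelArray(image_width, image_height, initValue = 0):
--
--     new_array = [[initValue for x in range(image_width)] for y in range(image_height)]
--     return new_array
--
-- def computeDilation8Nbh3x3FlatSE(px_array, image_width, image_height):
--     # assume is binary image with min=0, max=1
--     # using BorderIgnore for a 1px boundary
--     new_array = createInitializedGreyscalePixelArray(image_width, image_height)
--
--     for y in range(1, image_height - 1):
--         for x in range(1, image_width - 1):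
--
--             hits = False
--
--             # for each neighbour
--             for row in range(-1,2):
--                 for col in range(-1,2):
--                     if px_array[y+row][x+col] != 0: hits = True
--
--             if hits: new_array[y][x] = 1
--
--     return new_array
-- ===== SOURCE B (Python) =====
-- def computeDilation8Nbh3x3FlatSE(px_array, image_width, image_height):
--     # Two separable 1D passes (horizontal then vertical) instead of a 3x3 scan.
--     zeros = [[0 for x in range(image_width)] for y in range(image_height)]
--     if image_height < 3 or image_width < 3:
--         return zeros
--     H = [[(1 if 1 <= x <= image_width - 2 and (px_array[y][x - 1] or px_array[y][x] or px_array[y][x + 1]) else 0)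
--           for x in range(image_width)] for y in range(image_height)]
--     return [[(1 if 1 <= y <= image_height - 2 and 1 <= x <= image_width - 2
--               and (H[y - 1][x] or H[y][x] or H[y + 1][x]) else 0)
--              for x in range(image_width)] for y in range(image_height)]
-- ===== Notes on version B (the rewrite author's own statement) =====
-- stated objective: faster
-- what changed: Replaced the 9-cell 3x3 neighborhood scan per pixel with two separable 1D passes: a horizontal 3-cell OR buffer H computed for all rows, then a vertical 3-cell OR over H for interior pixels, with short-circuiting instead of A's exhaustive scan; Pre_ excludes only the inputs where A raises IndexError (image at least 3x3 claimed but px_array smaller).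
import Mathlib
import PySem

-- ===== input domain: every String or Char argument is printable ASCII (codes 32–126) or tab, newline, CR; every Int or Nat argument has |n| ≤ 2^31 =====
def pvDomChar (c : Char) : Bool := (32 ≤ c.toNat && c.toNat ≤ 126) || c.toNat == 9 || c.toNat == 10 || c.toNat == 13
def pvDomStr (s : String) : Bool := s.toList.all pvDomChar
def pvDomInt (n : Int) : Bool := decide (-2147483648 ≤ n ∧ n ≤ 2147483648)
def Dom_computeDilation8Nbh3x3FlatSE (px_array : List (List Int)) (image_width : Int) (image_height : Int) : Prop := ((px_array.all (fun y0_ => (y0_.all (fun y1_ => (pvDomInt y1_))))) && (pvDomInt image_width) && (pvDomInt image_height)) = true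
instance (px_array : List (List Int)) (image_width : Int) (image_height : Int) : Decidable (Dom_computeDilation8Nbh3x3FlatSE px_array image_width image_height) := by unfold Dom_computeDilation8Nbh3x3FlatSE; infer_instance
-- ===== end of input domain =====

-- B replaces A's 9-cell 3x3 scan per pixel by two separable 1D passes (a horizontal
-- 3-cell OR buffer, then a vertical 3-cell OR over it) — same output, fewer reads.

-- px[y][x] (both ports; indices are nonneg and in range under Pre_, where Python indexing = pyGetD)
def pvGet (a : List (List Int)) (y x : Int) : Int :=
  PySem.List.pyGetD (PySem.List.pyGetD a y []) x 0

-- ===== PORT A =====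
-- createInitializedGreyscalePixelArray(image_width, image_height, 0)
def pvInitArray (image_width image_height : Int) : List (List Int) :=
  (PySem.List.pyRange 0 image_height 1).map (fun _ =>
    (PySem.List.pyRange 0 image_width 1).map (fun _ => (0 : Int)))

def computeDilation8Nbh3x3FlatSE (px_array : List (List Int)) (image_width : Int) (image_height : Int) : List (List Int) :=
  let new_array := pvInitArray image_width image_height
  (PySem.List.pyRange 1 (image_height - 1) 1).foldl (fun arr y =>
    (PySem.List.pyRange 1 (image_width - 1) 1).foldl (fun arr x =>
      let hits := (PySem.List.pyRange (-1) 2 1).foldl (fun hb row =>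
        (PySem.List.pyRange (-1) 2 1).foldl (fun hb col =>
          if pvGet px_array (y + row) (x + col) ≠ 0 then true else hb) hb) false
      if hits then
        PySem.List.pySetD arr y (PySem.List.pySetD (PySem.List.pyGetD arr y []) x 1)
      else arr) arr) new_array

-- ===== PORT B =====
def computeDilation8Nbh3x3FlatSE_alt (px_array : List (List Int)) (image_width : Int) (image_height : Int) : List (List Int) :=
  let zeros := (PySem.List.pyRange 0 image_height 1).map (fun _ =>
    (PySem.List.pyRange 0 image_width 1).map (fun _ => (0 : Int)))
  if image_height < 3 ∨ image_width < 3 then zeros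
  else
    let H := (PySem.List.pyRange 0 image_height 1).map (fun y =>
      (PySem.List.pyRange 0 image_width 1).map (fun x =>
        if 1 ≤ x ∧ x ≤ image_width - 2 ∧
            (pvGet px_array y (x - 1) ≠ 0 ∨ pvGet px_array y x ≠ 0 ∨ pvGet px_array y (x + 1) ≠ 0)
        then (1 : Int) else 0))
    (PySem.List.pyRange 0 image_height 1).map (fun y =>
      (PySem.List.pyRange 0 image_width 1).map (fun x =>
        if 1 ≤ y ∧ y ≤ image_height - 2 ∧ 1 ≤ x ∧ x ≤ image_width - 2 ∧
            (pvGet H (y - 1) x ≠ 0 ∨ pvGet H y x ≠ 0 ∨ pvGet H (y + 1) x ≠ 0)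
        then (1 : Int) else 0))

-- ===== PRECONDITION & SPEC =====
-- Pre_ excludes exactly the inputs where A raises IndexError: image claimed at least 3x3
-- but px_array has fewer than image_height rows, or one of those rows is shorter than image_width.
def Pre_computeDilation8Nbh3x3FlatSE (px_array : List (List Int)) (image_width : Int) (image_height : Int) : Prop :=
  3 ≤ image_height → 3 ≤ image_width →
    (image_height ≤ (px_array.length : Int) ∧
     ∀ i : Nat, i < image_height.toNat → image_width ≤ ((px_array.getD i []).length : Int))
instance (px_array : List (List Int)) (image_width : Int) (image_height : Int) : Decidable (Pre_computeDilation8Nbh3x3FlatSE px_array image_width image_height) := by unfold Pre_computeDilation8Nbh3x3FlatSE; infer_instance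

def pvWitness_computeDilation8Nbh3x3FlatSE : List (List Int) × Int × Int :=
  ([[0, 0, 0], [0, 1, 0], [0, 0, 0]], 3, 3)

def Spec_computeDilation8Nbh3x3FlatSE (px_array : List (List Int)) (image_width : Int) (image_height : Int) (out : List (List Int)) : Prop := out = computeDilation8Nbh3x3FlatSE_alt px_array image_width image_height
instance (px_array : List (List Int)) (image_width : Int) (image_height : Int) (out : List (List Int)) : Decidable (Spec_computeDilation8Nbh3x3FlatSE px_array image_width image_height out) := by unfold Spec_computeDilation8Nbh3x3FlatSE; infer_instance

-- ===== CLAIM (what is proved, stated in full; the proofs are below) =====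
def Claim_equal_computeDilation8Nbh3x3FlatSE : Prop := ∀ (px_array : List (List Int)) (image_width : Int) (image_height : Int), Dom_computeDilation8Nbh3x3FlatSE px_array image_width image_height → Pre_computeDilation8Nbh3x3FlatSE px_array image_width image_height → Spec_computeDilation8Nbh3x3FlatSE px_array image_width image_height (computeDilation8Nbh3x3FlatSE px_array image_width image_height)

-- ===== LEMMAS AND PROOFS =====

-- the horizontal 3-cell OR, and the full 3x3 OR grouped by rows
abbrev pvHoriz (px : List (List Int)) (y x : Int) : Prop :=
  pvGet px y (x - 1) ≠ 0 ∨ pvGet px y x ≠ 0 ∨ pvGet px y (x + 1) ≠ 0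
abbrev pvHit (px : List (List Int)) (y x : Int) : Prop :=
  pvHoriz px (y - 1) x ∨ pvHoriz px y x ∨ pvHoriz px (y + 1) x

-- A's inner 3x3 hits-loop value
def pvHitsB (px : List (List Int)) (y x : Int) : Bool :=
  (PySem.List.pyRange (-1) 2 1).foldl (fun hb row =>
    (PySem.List.pyRange (-1) 2 1).foldl (fun hb col =>
      if pvGet px (y + row) (x + col) ≠ 0 then true else hb) hb) false

-- A's inner-x loop as a function of the accumulator array, and the row it writes
def pvOuterStep (f : Int → Int → Bool) (xs : List Int) (a : List (List Int)) (y : Int) : List (List Int) :=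
  xs.foldl (fun a x =>
    if f y x then PySem.List.pySetD a y (PySem.List.pySetD (PySem.List.pyGetD a y []) x 1) else a) a
def pvRowFun (f : Int → Int → Bool) (xs : List Int) (y : Int) (r : List Int) : List Int :=
  xs.foldl (fun r x => if f y x then PySem.List.pySetD r x 1 else r) r

theorem pvHitsB_eq (px : List (List Int)) (y x : Int) :
    pvHitsB px y x = true ↔ pvHit px y x := by
  unfold pvHitsB pvHit pvHoriz
  rw [show PySem.List.pyRange (-1) 2 1 = [-1, 0, 1] from rfl]
  simp only [List.foldl, Bool.if_true_left, Bool.or_eq_true, decide_eq_true_eq, sub_eq_add_neg,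
    add_zero]
  tauto

theorem pvRowFun_length (f : Int → Int → Bool) (xs : List Int) (y : Int) :
    ∀ r : List Int, (pvRowFun f xs y r).length = r.length := by
  induction xs with
  | nil => intro r; rfl
  | cons x xs ih =>
    intro r
    show (pvRowFun f xs y (if f y x then PySem.List.pySetD r x 1 else r)).length = r.length
    rw [ih]
    split <;> simp [PySem.List.length_pySetD]

theorem pvRowFun_getD (f : Int → Int → Bool) (y : Int) :
    ∀ (xs : List Int) (r : List Int), xs.Nodup → (∀ x ∈ xs, 0 ≤ x) →
      ∀ j : Nat, j < r.length →
        (pvRowFun f xs y r).getD j 0 =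
          if (j : Int) ∈ xs ∧ f y (j : Int) = true then 1 else r.getD j 0 := by
  intro xs
  induction xs with
  | nil => intro r _ _ j hj; simp [pvRowFun]
  | cons x xs ih =>
    intro r hnd hnn j hj
    have hx0 : 0 ≤ x := hnn x (List.mem_cons_self ..)
    have hstep : pvRowFun f (x :: xs) y r
        = pvRowFun f xs y (if f y x then PySem.List.pySetD r x 1 else r) := rfl
    rw [hstep]
    have hlen : (if f y x then PySem.List.pySetD r x 1 else r).length = r.length := by
      split <;> simp [PySem.List.length_pySetD]
    rw [ih _ hnd.of_cons (fun z hz => hnn z (List.mem_cons_of_mem _ hz)) j (hlen ▸ hj)]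
    by_cases hjx : (j : Int) = x
    · -- j is the index written this step; j ∉ xs by Nodup
      have hjn : (j : Int) ∉ xs := by
        rw [hjx]; exact hnd.notMem
      have hset : PySem.List.pySetD r x 1 = r.set j 1 := by
        rw [PySem.List.pySetD_of_nonneg _ _ hx0]; congr 1; omega
      simp only [List.mem_cons, hjx, true_or, true_and]
      by_cases hf : f y x = true
      · simp only [hf, if_true, hset, List.getD_eq_getElem?_getD,
          List.getElem?_set_self hj, Option.getD_some]
        split <;> rfl
      · simp [hf]
    · -- untouched index
      have hget : (if f y x then PySem.List.pySetD r x 1 else r).getD j 0 = r.getD j 0 := by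
        split
        · rw [PySem.List.pySetD_of_nonneg _ _ hx0]
          have : x.toNat ≠ j := by omega
          simp [List.getD_eq_getElem?_getD, List.getElem?_set_ne this]
        · rfl
      rw [hget]
      have hmem : ((j : Int) ∈ x :: xs) ↔ ((j : Int) ∈ xs) := by
        simp [List.mem_cons, hjx]
      simp [hmem]

theorem pvOuterStep_eq (f : Int → Int → Bool) (xs : List Int) (y : Int) :
    ∀ (arr : List (List Int)), 0 ≤ y → y < (arr.length : Int) →
    pvOuterStep f xs arr y =
      PySem.List.pySetD arr y (pvRowFun f xs y (PySem.List.pyGetD arr y [])) := by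
  induction xs with
  | nil =>
    intro arr h0 h1
    show arr = PySem.List.pySetD arr y (PySem.List.pyGetD arr y [])
    rw [PySem.List.pySetD_of_nonneg _ _ h0,
      PySem.List.pyGetD_eq_getElem _ _ h0 (by simpa using h1),
      List.set_getElem_self]
  | cons x xs ih =>
    intro arr h0 h1
    have hyn : y.toNat < arr.length := by omega
    have hstep : pvOuterStep f (x :: xs) arr y
        = pvOuterStep f xs
            (if f y x then
              PySem.List.pySetD arr y (PySem.List.pySetD (PySem.List.pyGetD arr y []) x 1)
             else arr) y := rfl
    have hrow : ∀ r : List Int, pvRowFun f (x :: xs) y r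
        = pvRowFun f xs y (if f y x then PySem.List.pySetD r x 1 else r) := fun r => rfl
    rw [hstep, hrow]
    set r0 := PySem.List.pyGetD arr y [] with hr0
    by_cases hf : f y x = true
    · have harr1 : (if f y x then
          PySem.List.pySetD arr y (PySem.List.pySetD r0 x 1) else arr)
          = arr.set y.toNat (PySem.List.pySetD r0 x 1) := by
        rw [if_pos hf, PySem.List.pySetD_of_nonneg _ _ h0]
      rw [harr1, ih _ h0 (by simpa using h1), if_pos hf]
      have hget : PySem.List.pyGetD (arr.set y.toNat (PySem.List.pySetD r0 x 1)) y []
          = PySem.List.pySetD r0 x 1 := by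
        rw [PySem.List.pyGetD_eq_getElem _ _ h0 (by simpa using h1)]
        simp [List.getElem_set_self]
      rw [hget, PySem.List.pySetD_of_nonneg _ _ h0, PySem.List.pySetD_of_nonneg _ _ h0,
        List.set_set]
    · rw [if_neg hf, if_neg hf, ih _ h0 h1]

theorem pvOuterStep_length (f : Int → Int → Bool) (xs : List Int) (y : Int) :
    ∀ (arr : List (List Int)), (pvOuterStep f xs arr y).length = arr.length := by
  induction xs with
  | nil => intro arr; rfl
  | cons x xs ih =>
    intro arr
    show (pvOuterStep f xs (if f y x then _ else arr) y).length = arr.length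
    rw [ih]
    split <;> simp [PySem.List.length_pySetD]

theorem pvOuter_length (f : Int → Int → Bool) (xs : List Int) :
    ∀ (ys : List Int) (arr : List (List Int)),
      (ys.foldl (pvOuterStep f xs) arr).length = arr.length := by
  intro ys
  induction ys with
  | nil => intro arr; rfl
  | cons y ys ih =>
    intro arr
    show (ys.foldl (pvOuterStep f xs) (pvOuterStep f xs arr y)).length = arr.length
    rw [ih, pvOuterStep_length]

theorem pvOuter_getD (f : Int → Int → Bool) (xs : List Int) :
    ∀ (ys : List Int) (arr : List (List Int)), ys.Nodup →
      (∀ y ∈ ys, 0 ≤ y ∧ y < (arr.length : Int)) →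
      ∀ i : Nat, i < arr.length →
        (ys.foldl (pvOuterStep f xs) arr).getD i [] =
          if (i : Int) ∈ ys then pvRowFun f xs (i : Int) (arr.getD i []) else arr.getD i [] := by
  intro ys
  induction ys with
  | nil => intro arr _ _ i hi; simp
  | cons y ys ih =>
    intro arr hnd hbnd i hi
    obtain ⟨hy0, hy1⟩ := hbnd y (List.mem_cons_self ..)
    have hyn : y.toNat < arr.length := by omega
    have harr1 : ys.foldl (pvOuterStep f xs) (pvOuterStep f xs arr y)
        = ys.foldl (pvOuterStep f xs)
            (arr.set y.toNat (pvRowFun f xs y (PySem.List.pyGetD arr y []))) := by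
      rw [pvOuterStep_eq f xs y arr hy0 hy1, PySem.List.pySetD_of_nonneg _ _ hy0]
    show (ys.foldl (pvOuterStep f xs) (pvOuterStep f xs arr y)).getD i [] = _
    rw [harr1]
    set r := pvRowFun f xs y (PySem.List.pyGetD arr y []) with hr
    have hlen : (arr.set y.toNat r).length = arr.length := by simp
    rw [ih (arr.set y.toNat r) hnd.of_cons
      (fun z hz => by have := hbnd z (List.mem_cons_of_mem _ hz); simpa [hlen] using this)
      i (by rw [hlen]; exact hi)]
    by_cases hiy : (i : Int) = y
    · have hin : y.toNat = i := by omega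
      have hnotmem : (i : Int) ∉ ys := by rw [hiy]; exact hnd.notMem
      have hset : (arr.set y.toNat r).getD i [] = r := by
        rw [hin, List.getD_eq_getElem?_getD, List.getElem?_set_self hi, Option.getD_some]
      have hrow : r = pvRowFun f xs (i : Int) (arr.getD i []) := by
        rw [hr, ← hiy, PySem.List.pyGetD_eq_getElem _ _ (by omega) (by omega),
          List.getD_eq_getElem _ _ hi]
        simp
      rw [if_neg hnotmem, if_pos (show (i:Int) ∈ y :: ys by simp [List.mem_cons, hiy]),
        hset, hrow]
    · have hne : y.toNat ≠ i := by omega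
      have hget : (arr.set y.toNat r).getD i [] = arr.getD i [] := by
        simp [List.getD_eq_getElem?_getD, List.getElem?_set_ne hne]
      rw [hget]
      have hmem : ((i : Int) ∈ y :: ys) ↔ ((i : Int) ∈ ys) := by
        simp [List.mem_cons, hiy]
      simp [hmem]

theorem pvGetD_map_const_lt {α β : Type} (g : α → β) (l : List α) (c : β) (i : Nat) (d : β)
    (h : i < l.length) (hc : ∀ a, g a = c) : (l.map g).getD i d = c := by
  rw [List.getD_eq_getElem?_getD, List.getElem?_map, List.getElem?_eq_getElem h]
  simp [hc]

theorem pvIte_ne_zero (c : Prop) [Decidable c] : ((if c then (1 : Int) else 0) ≠ 0) ↔ c := by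
  split <;> simp [*]

-- B's horizontal buffer H, as the port builds it
def pvH (px : List (List Int)) (image_width image_height : Int) : List (List Int) :=
  (PySem.List.pyRange 0 image_height 1).map (fun y =>
    (PySem.List.pyRange 0 image_width 1).map (fun x =>
      if 1 ≤ x ∧ x ≤ image_width - 2 ∧ pvHoriz px y x then (1 : Int) else 0))

theorem pvAlt_eq (px : List (List Int)) (w h : Int) (h3 : 3 ≤ h) (w3 : 3 ≤ w) :
    computeDilation8Nbh3x3FlatSE_alt px w h =
      (PySem.List.pyRange 0 h 1).map (fun y =>
        (PySem.List.pyRange 0 w 1).map (fun x =>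
          if 1 ≤ y ∧ y ≤ h - 2 ∧ 1 ≤ x ∧ x ≤ w - 2 ∧
              (pvGet (pvH px w h) (y - 1) x ≠ 0 ∨ pvGet (pvH px w h) y x ≠ 0 ∨
               pvGet (pvH px w h) (y + 1) x ≠ 0)
          then (1 : Int) else 0)) := by
  unfold computeDilation8Nbh3x3FlatSE_alt pvH pvHoriz
  rw [if_neg (by omega)]

theorem pvGet_pvH (px : List (List Int)) (w h y x : Int)
    (hy0 : 0 ≤ y) (hy1 : y < h) (hx0 : 0 ≤ x) (hx1 : x < w) :
    pvGet (pvH px w h) y x = if 1 ≤ x ∧ x ≤ w - 2 ∧ pvHoriz px y x then 1 else 0 := by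
  unfold pvGet pvH
  rw [PySem.List.pyGetD_map_pyRange_of_nonneg _ _ _ _ hy0 hy1,
    PySem.List.pyGetD_map_pyRange_of_nonneg _ _ _ _ hx0 hx1]
  rfl

theorem pvA_eq (px : List (List Int)) (w h : Int) :
    computeDilation8Nbh3x3FlatSE px w h =
      (PySem.List.pyRange 1 (h - 1) 1).foldl
        (pvOuterStep (pvHitsB px) (PySem.List.pyRange 1 (w - 1) 1)) (pvInitArray w h) := rfl

-- ===== VERDICT (by name: the statement is the Claim_ definition above) =====
set_option maxHeartbeats 1000000 in
theorem computeDilation8Nbh3x3FlatSE_spec : Claim_equal_computeDilation8Nbh3x3FlatSE := by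
  intro px w h hdom hpre
  unfold Spec_computeDilation8Nbh3x3FlatSE
  by_cases hsmall : h < 3 ∨ w < 3
  · -- no interior pixels: both sides are the all-zero array
    have hB : computeDilation8Nbh3x3FlatSE_alt px w h =
        (PySem.List.pyRange 0 h 1).map (fun _ =>
          (PySem.List.pyRange 0 w 1).map (fun _ => (0 : Int))) := by
      unfold computeDilation8Nbh3x3FlatSE_alt
      rw [if_pos hsmall]
    rw [pvA_eq, hB]
    rcases hsmall with hh | hw
    · rw [PySem.List.pyRange_one_eq_nil (by omega : h - 1 ≤ 1)]
      rfl
    · rw [PySem.List.pyRange_one_eq_nil (by omega : w - 1 ≤ 1),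
        show (pvOuterStep (pvHitsB px) ([] : List Int))
            = (fun (a : List (List Int)) (_ : Int) => a) from rfl,
        PySem.List.foldl_ignore]
      rfl
  · obtain ⟨h3, w3⟩ : 3 ≤ h ∧ 3 ≤ w := by
      constructor <;> by_contra hc <;> exact hsmall (by omega)
    obtain ⟨hplen, hprow⟩ := hpre h3 w3
    rw [pvA_eq, pvAlt_eq px w h h3 w3]
    -- abbreviations
    set ys := PySem.List.pyRange 1 (h - 1) 1 with hys
    set xs := PySem.List.pyRange 1 (w - 1) 1 with hxs
    set zr := (PySem.List.pyRange 0 w 1).map (fun _ => (0 : Int)) with hzr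
    have hn0 : pvInitArray w h = (PySem.List.pyRange 0 h 1).map (fun _ => zr) := rfl
    have hzrlen : zr.length = w.toNat := by
      rw [hzr, List.length_map, PySem.List.length_pyRange_one]; omega
    have hn0len : (pvInitArray w h).length = h.toNat := by
      rw [hn0, List.length_map, PySem.List.length_pyRange_one]; omega
    have hAlen : ((ys.foldl (pvOuterStep (pvHitsB px) xs) (pvInitArray w h))).length = h.toNat := by
      rw [pvOuter_length, hn0len]
    apply List.ext_getElem
    · rw [hAlen, List.length_map, PySem.List.length_pyRange_one]; omega
    intro i hi1 hi2
    have hih : i < h.toNat := by rwa [hAlen] at hi1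
    -- the A-side row
    have hbnd : ∀ y ∈ ys, 0 ≤ y ∧ y < ((pvInitArray w h).length : Int) := by
      intro y hy
      rw [hys, PySem.List.mem_pyRange_one] at hy
      constructor
      · omega
      · rw [hn0len]; omega
    have hrowA : (ys.foldl (pvOuterStep (pvHitsB px) xs) (pvInitArray w h)).getD i [] =
        if (i : Int) ∈ ys then pvRowFun (pvHitsB px) xs (i : Int) zr else zr := by
      rw [pvOuter_getD (pvHitsB px) xs ys (pvInitArray w h)
        (by rw [hys]; exact PySem.List.nodup_pyRange_one _ _) hbnd i (by omega)]
      have : (pvInitArray w h).getD i [] = zr := by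
        rw [hn0]
        exact pvGetD_map_const_lt _ _ _ _ _ (by rw [PySem.List.length_pyRange_one]; omega)
          (fun _ => rfl)
      rw [this]
    -- transfer to getElem form
    have hArow : (ys.foldl (pvOuterStep (pvHitsB px) xs) (pvInitArray w h))[i] =
        if (i : Int) ∈ ys then pvRowFun (pvHitsB px) xs (i : Int) zr else zr := by
      rw [← List.getD_eq_getElem _ [] hi1, hrowA]
    rw [hArow]
    -- the B-side row
    rw [List.getElem_map, PySem.List.getElem_pyRange_one]
    -- row-level extensionality
    apply List.ext_getElem
    · rw [List.length_map, PySem.List.length_pyRange_one]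
      split
      · rw [pvRowFun_length, hzrlen]; omega
      · rw [hzrlen]; omega
    intro j hj1 hj2
    have hjw : j < w.toNat := by
      rw [List.length_map, PySem.List.length_pyRange_one] at hj2; omega
    rw [List.getElem_map, PySem.List.getElem_pyRange_one]
    simp only [zero_add]
    have hxsnodup : xs.Nodup := by rw [hxs]; exact PySem.List.nodup_pyRange_one _ _
    -- A entry in getD form
    have hAentry : (if (i : Int) ∈ ys then pvRowFun (pvHitsB px) xs (i : Int) zr else zr)[j]
        = (if (i : Int) ∈ ys then pvRowFun (pvHitsB px) xs (i : Int) zr else zr).getD j 0 := by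
      rw [List.getD_eq_getElem _ 0 hj1]
    rw [hAentry]
    have hzrj : zr.getD j 0 = 0 := by
      rw [hzr]
      exact pvGetD_map_const_lt _ _ _ _ _ (by rw [PySem.List.length_pyRange_one]; omega)
        (fun _ => rfl)
    by_cases hbi : 1 ≤ (i : Int) ∧ (i : Int) ≤ h - 2
    · by_cases hbj : 1 ≤ (j : Int) ∧ (j : Int) ≤ w - 2
      · -- interior pixel: both sides are  if ⟨3x3 hit⟩ then 1 else 0
        have hmi : (i : Int) ∈ ys := by rw [hys, PySem.List.mem_pyRange_one]; omega
        have hmj : (j : Int) ∈ xs := by rw [hxs, PySem.List.mem_pyRange_one]; omega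
        rw [if_pos hmi,
          pvRowFun_getD (pvHitsB px) (i : Int) xs zr hxsnodup
            (fun x hx => by rw [hxs, PySem.List.mem_pyRange_one] at hx; omega) j
            (by rw [hzrlen]; omega),
          hzrj,
          pvGet_pvH px w h _ _ (by omega) (by omega) (by omega) (by omega),
          pvGet_pvH px w h _ _ (by omega) (by omega) (by omega) (by omega),
          pvGet_pvH px w h _ _ (by omega) (by omega) (by omega) (by omega)]
        simp only [pvHitsB_eq, pvIte_ne_zero]
        apply if_congr _ rfl rfl
        constructor
        · rintro ⟨_, hc | hc | hc⟩
          · exact ⟨hbi.1, hbi.2, hbj.1, hbj.2, Or.inl ⟨hbj.1, hbj.2, hc⟩⟩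
          · exact ⟨hbi.1, hbi.2, hbj.1, hbj.2, Or.inr (Or.inl ⟨hbj.1, hbj.2, hc⟩)⟩
          · exact ⟨hbi.1, hbi.2, hbj.1, hbj.2, Or.inr (Or.inr ⟨hbj.1, hbj.2, hc⟩)⟩
        · rintro ⟨_, _, _, _, hd | hd | hd⟩
          · exact ⟨hmj, Or.inl hd.2.2⟩
          · exact ⟨hmj, Or.inr (Or.inl hd.2.2)⟩
          · exact ⟨hmj, Or.inr (Or.inr hd.2.2)⟩
      · -- border column: both sides 0
        have hmj : (j : Int) ∉ xs := by
          rw [hxs, PySem.List.mem_pyRange_one]; omega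
        have hL : (if (i : Int) ∈ ys then pvRowFun (pvHitsB px) xs (i : Int) zr else zr).getD j 0
            = 0 := by
          split
          · rw [pvRowFun_getD (pvHitsB px) (i : Int) xs zr hxsnodup
              (fun x hx => by rw [hxs, PySem.List.mem_pyRange_one] at hx; omega) j
              (by rw [hzrlen]; omega), if_neg (fun hcc => hmj hcc.1), hzrj]
          · exact hzrj
        rw [hL, if_neg]
        rintro ⟨_, _, hc, hd, _⟩
        omega
    · -- border row: both sides 0
      have hmi : (i : Int) ∉ ys := by rw [hys, PySem.List.mem_pyRange_one]; omega
      rw [if_neg hmi, hzrj, if_neg]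
      rintro ⟨hc, hd, _⟩
      omega
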